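-- pv_equiv track=rewrite | github.com/aymanshub/python-interview-questions | space_illumenator.py | space_illumenator
-- ===== SOURCE A (Python) =====
-- def space_illumenator(usr_input):
--     result = []
--     for letter in usr_input:
--         if letter != " ":
--             result.append(letter)
--
--         else:
--             if len(result) == 0 or result[-1] == " ":
--                 continue
--             else:
--                 result.append(letter)
--
--     return result
-- ===== SOURCE B (Python) =====
-- def space_illumenator(usr_input):
--     result = []
--     i, n = 0, len(usr_input)
--     while i < n:
--         if usr_input[i] == ' ':
--             if result:
--                 result.append(usr_input[i])
--             while i < n and usr_input[i] == ' ':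
--                 i += 1
--         else:
--             j = i
--             while j < n and usr_input[j] != ' ':
--                 j += 1
--             result.extend(usr_input[i:j])
--             i = j
--     return result
-- ===== Notes on version B (the rewrite author's own statement) =====
-- stated objective: alternative
-- what changed: B replaces A's per-character loop that inspects result[-1] with an index-jumping run scanner: it processes whole runs of spaces/non-spaces at a time, extending with each non-space run and appending one space per internal space run, never re-inspecting the output list's tail.
import Mathlib
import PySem

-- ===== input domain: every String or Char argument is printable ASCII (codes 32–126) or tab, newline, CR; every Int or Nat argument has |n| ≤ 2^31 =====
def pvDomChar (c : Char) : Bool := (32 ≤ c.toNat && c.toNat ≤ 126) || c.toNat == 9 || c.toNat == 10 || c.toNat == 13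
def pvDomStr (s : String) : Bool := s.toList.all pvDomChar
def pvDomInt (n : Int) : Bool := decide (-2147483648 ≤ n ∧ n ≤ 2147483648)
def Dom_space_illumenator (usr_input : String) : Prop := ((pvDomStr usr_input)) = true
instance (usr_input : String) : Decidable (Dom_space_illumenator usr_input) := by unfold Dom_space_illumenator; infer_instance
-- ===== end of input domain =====

-- B replaces A's per-character loop (which re-inspects result[-1]) with an index-jumping
-- run scanner: whole non-space runs are copied at once, each space run becomes one space
-- (dropped if nothing was emitted yet); objective: alternative decomposition, same cost.

-- ===== PORT A =====
def space_illumenator (usr_input : String) : List String :=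
  usr_input.toList.foldl (fun result letter =>
    if letter != ' ' then result ++ [letter.toString]
    else if result.length == 0 || result.getLastD "" == " " then result
    else result ++ [letter.toString]) []

-- ===== PORT B =====
-- run scanner: the inner `while` scans of Source B become takeWhile/dropWhile on the tail
def pvAltGo : List Char → List String → List String
  | [], result => result
  | c :: cs, result =>
    if c == ' ' then
      pvAltGo (cs.dropWhile (· == ' '))
        (if result.isEmpty then result else result ++ [c.toString])
    else
      pvAltGo (cs.dropWhile (· != ' '))
        (result ++ ((c :: cs.takeWhile (· != ' ')).map Char.toString))
termination_by l _ => l.length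
decreasing_by
  · exact Nat.lt_succ_of_le (List.length_dropWhile_le _ _)
  · exact Nat.lt_succ_of_le (List.length_dropWhile_le _ _)

def space_illumenator_alt (usr_input : String) : List String :=
  pvAltGo usr_input.toList []

-- ===== PRECONDITION & SPEC =====
def Spec_space_illumenator (usr_input : String) (out : List String) : Prop := out = space_illumenator_alt usr_input
instance (usr_input : String) (out : List String) : Decidable (Spec_space_illumenator usr_input out) := by unfold Spec_space_illumenator; infer_instance

-- ===== CLAIM (what is proved, stated in full; the proofs are below) =====
def Claim_equal_space_illumenator : Prop := ∀ (usr_input : String), Dom_space_illumenator usr_input → Spec_space_illumenator usr_input (space_illumenator usr_input)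

-- ===== LEMMAS AND PROOFS =====
-- A's loop body, named so lemmas can speak about it (space_illumenator = foldl pvStep [] by rfl)
def pvStep (result : List String) (letter : Char) : List String :=
  if letter != ' ' then result ++ [letter.toString]
  else if result.length == 0 || result.getLastD "" == " " then result
  else result ++ [letter.toString]

theorem pv_stepA (s : String) : space_illumenator s = s.toList.foldl pvStep [] := rfl

theorem pv_toString_ne_space {c : Char} (h : c ≠ ' ') : c.toString ≠ " " := by
  simp [Char.toString]
  intro he
  exact h (by have := congrArg String.toList he; simpa [String.singleton] using this)

theorem pv_getLastD_app {r b : List String} (h : b ≠ []) :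
    (r ++ b).getLastD "" = b.getLastD "" := by
  rw [List.getLastD_eq_getLast?, List.getLastD_eq_getLast?,
    List.getLast?_append_of_ne_nil (l₁ := r) h]

theorem pv_last_map_ne_space : ∀ (run : List Char) (c : Char), (∀ x ∈ c :: run, x ≠ ' ') →
    ∀ (r : List String), (r ++ (c :: run).map Char.toString).getLastD "" ≠ " " := by
  intro run
  induction run with
  | nil =>
    intro c h r
    simpa [pv_getLastD_app (r := r) (b := [c.toString]) (by simp)] using
      pv_toString_ne_space (h c (by simp))
  | cons d run ih =>
    intro c h r
    have h' : ∀ x ∈ d :: run, x ≠ ' ' := by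
      intro x hx; exact h x (by simp at hx ⊢; tauto)
    have : (c :: d :: run).map Char.toString
        = [c.toString] ++ (d :: run).map Char.toString := by simp
    rw [this, ← List.append_assoc]
    exact ih d h' (r ++ [c.toString])

-- skipping a run of spaces leaves A's accumulator unchanged when the space branch skips
theorem pv_fold_spaces (sp : List Char) (rest : List Char) (r : List String)
    (hsp : ∀ x ∈ sp, x = ' ') (hr : r = [] ∨ r.getLastD "" = " ") :
    List.foldl pvStep r (sp ++ rest) = List.foldl pvStep r rest := by
  induction sp with
  | nil => rfl
  | cons a sp ih =>
    have ha : a = ' ' := hsp a (by simp)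
    have hstep : pvStep r a = r := by
      subst ha
      unfold pvStep
      rw [if_neg (by simp), if_pos (by simpa [← List.getLastD_eq_getLast?] using hr)]
    simpa [hstep] using ih (fun x hx => hsp x (by simp [hx]))

-- a run of non-spaces is appended character by character
theorem pv_fold_run : ∀ (run : List Char) (rest : List Char) (r : List String),
    (∀ x ∈ run, x ≠ ' ') →
    List.foldl pvStep r (run ++ rest) = List.foldl pvStep (r ++ run.map Char.toString) rest := by
  intro run
  induction run with
  | nil => intro rest r _; simp
  | cons a run ih =>
    intro rest r h
    have ha : a ≠ ' ' := h a (by simp)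
    have hstep : pvStep r a = r ++ [a.toString] := by simp [pvStep, ha]
    rw [List.cons_append, List.foldl_cons, hstep,
      ih rest (r ++ [a.toString]) (fun x hx => h x (by simp [hx]))]
    simp

theorem pv_main : ∀ (n : ℕ) (l : List Char) (r : List String), l.length ≤ n →
    (l.head? = some ' ' → r = [] ∨ r.getLastD "" ≠ " ") →
    List.foldl pvStep r l = pvAltGo l r := by
  intro n
  induction n with
  | zero =>
    intro l r hl _
    have : l = [] := List.length_eq_zero_iff.mp (Nat.le_zero.mp hl)
    subst this; simp [pvAltGo]
  | succ n ih =>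
    intro l r hl hhead
    cases l with
    | nil => simp [pvAltGo]
    | cons c cs =>
      have hcs : cs.length ≤ n := by simpa using hl
      by_cases hc : c = ' '
      · subst hc
        by_cases hre : r = []
        · -- result empty: the space is dropped, then the rest of the space run is skipped
          subst hre
          have hstep : pvStep [] ' ' = [] := by
            unfold pvStep
            rw [if_neg (by simp), if_pos (by simp)]
          have hsplit : cs = cs.takeWhile (· == ' ') ++ cs.dropWhile (· == ' ') :=
            (List.takeWhile_append_dropWhile).symm
          rw [List.foldl_cons, hstep]
          conv_lhs => rw [hsplit]
          rw [pv_fold_spaces _ _ [] (fun x hx => by simpa using List.mem_takeWhile_imp hx)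
              (Or.inl rfl)]
          rw [show pvAltGo (' ' :: cs) [] = pvAltGo (cs.dropWhile (· == ' ')) [] by
            simp [pvAltGo]]
          refine ih _ _ (le_trans (List.length_dropWhile_le _ _) hcs) ?_
          intro hh
          have := List.head?_dropWhile_not (· == ' ') cs
          rw [hh] at this
          simp at this
        · -- result nonempty with non-space tail: append one space, skip the space run
          have hr : r.getLastD "" ≠ " " := by
            rcases hhead rfl with h | h
            · exact absurd h hre
            · exact h
          have hstep : pvStep r ' ' = r ++ [" "] := by
            unfold pvStep
            rw [if_neg (by simp),
              if_neg (by simpa [← List.getLastD_eq_getLast?] using And.intro hre hr)]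
            rfl
          have hlast : (r ++ [" "]).getLastD "" = " " := by
            rw [pv_getLastD_app (r := r) (b := [" "]) (by simp)]; rfl
          have hsplit : cs = cs.takeWhile (· == ' ') ++ cs.dropWhile (· == ' ') :=
            (List.takeWhile_append_dropWhile).symm
          rw [List.foldl_cons, hstep]
          conv_lhs => rw [hsplit]
          rw [pv_fold_spaces _ _ _ (fun x hx => by simpa using List.mem_takeWhile_imp hx)
              (Or.inr hlast)]
          rw [show pvAltGo (' ' :: cs) r = pvAltGo (cs.dropWhile (· == ' ')) (r ++ [" "]) by
            simp [pvAltGo, List.isEmpty_iff, hre]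
            rfl]
          refine ih _ _ (le_trans (List.length_dropWhile_le _ _) hcs) ?_
          intro hh
          have := List.head?_dropWhile_not (· == ' ') cs
          rw [hh] at this
          simp at this
      · -- non-space: copy the whole maximal non-space run
        have hrun : ∀ x ∈ c :: cs.takeWhile (· != ' '), x ≠ ' ' := by
          intro x hx
          rcases List.mem_cons.mp hx with h | h
          · subst h; exact hc
          · simpa using List.mem_takeWhile_imp h
        have hstep : pvStep r c = r ++ [c.toString] := by simp [pvStep, hc]
        have hsplit : cs = cs.takeWhile (· != ' ') ++ cs.dropWhile (· != ' ') :=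
          (List.takeWhile_append_dropWhile).symm
        rw [List.foldl_cons, hstep]
        conv_lhs => rw [hsplit]
        rw [pv_fold_run _ _ _ (fun x hx => hrun x (by simp [hx]))]
        rw [show pvAltGo (c :: cs) r
            = pvAltGo (cs.dropWhile (· != ' '))
                (r ++ (c :: cs.takeWhile (· != ' ')).map Char.toString) by
          simp [pvAltGo, hc]]
        have hacc : r ++ [c.toString] ++ (cs.takeWhile (· != ' ')).map Char.toString
            = r ++ (c :: cs.takeWhile (· != ' ')).map Char.toString := by simp
        rw [hacc]
        refine ih _ _ (le_trans (List.length_dropWhile_le _ _) hcs) ?_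
        intro _
        exact Or.inr (pv_last_map_ne_space _ c hrun r)
-- ===== VERDICT (by name: the statement is the Claim_ definition above) =====
theorem space_illumenator_spec : Claim_equal_space_illumenator := by
  intro s _
  unfold Spec_space_illumenator space_illumenator_alt
  rw [pv_stepA]
  exact pv_main s.toList.length s.toList [] le_rfl (fun _ => Or.inl rfl)
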